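-- pv_equiv track=rewrite | github.com/davidshih/aer | REVIEW/source/cell_6_report.py | _resolve_col_map
-- ===== SOURCE A (Python) =====
-- def _find_col(headers, keywords):
--     for idx, h in enumerate(headers):
--         if not h:
--             continue
--         h_str = str(h).strip().lower()
--         if all(k in h_str for k in keywords):
--             return idx
--     return None
--
-- def _resolve_col_map(header, app_col_map=None):
--     if app_col_map:
--         return app_col_map, "app-locked"
--     idx_rev = _find_col(header, ["reviewer"])
--     idx_res = _find_col(header, ["response"])
--     idx_det = _find_col(header, ["details", "change"])
--     idx_user = None
--     idx_email = None
--     # Fix: separate reviewer from reviewer's response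
--     if idx_rev is not None:
--         rev_hdr = str(header[idx_rev]).strip().lower() if header[idx_rev] else ""
--         if "response" in rev_hdr:
--             idx_rev = None
--             for i, h in enumerate(header):
--                 h_str = str(h).strip().lower() if h else ""
--                 if "reviewer" in h_str and "response" not in h_str:
--                     idx_rev = i
--                     break
--     for i, h in enumerate(header):
--         h_str = str(h).strip().lower() if h else ""
--         if idx_user is None and ("name" in h_str or "display" in h_str) and "reviewer" not in h_str and "manager" not in h_str:
--             idx_user = i
--         if idx_email is None and ("email" in h_str or h_str == "mail"):
--             idx_email = i
--     if idx_rev is None or idx_res is None: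
--         return None, "invalid"
--     return {"idx_rev": idx_rev, "idx_res": idx_res, "idx_det": idx_det,
--             "idx_user": idx_user, "idx_email": idx_email}, "detected"
-- ===== SOURCE B (Python) =====
-- def _resolve_col_map(header, app_col_map=None):
--     if app_col_map:
--         return app_col_map, "app-locked"
--     idx_rev = idx_res = idx_det = idx_user = idx_email = None
--     # one backwards pass; overwriting keeps the FIRST (lowest-index) match
--     for i in range(len(header) - 1, -1, -1):
--         h = header[i]
--         s = str(h).strip().lower() if h else ""
--         if "reviewer" in s and "response" not in s:
--             idx_rev = i
--         if "response" in s: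
--             idx_res = i
--         if "details" in s and "change" in s:
--             idx_det = i
--         if ("name" in s or "display" in s) and "reviewer" not in s and "manager" not in s:
--             idx_user = i
--         if "email" in s or s == "mail":
--             idx_email = i
--     if idx_rev is None or idx_res is None:
--         return None, "invalid"
--     return {"idx_rev": idx_rev, "idx_res": idx_res, "idx_det": idx_det,
--             "idx_user": idx_user, "idx_email": idx_email}, "detected"
-- ===== Notes on version B (the rewrite author's own statement) =====
-- stated objective: simpler
-- what changed: Replaces three _find_col scans, the conditional reviewer re-scan and the user/email scan with a single backwards pass over header that overwrites five indices, so the last write at each slot is the first match; the reviewer re-scan collapses into the single condition 'reviewer in s and response not in s'.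
import Mathlib
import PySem

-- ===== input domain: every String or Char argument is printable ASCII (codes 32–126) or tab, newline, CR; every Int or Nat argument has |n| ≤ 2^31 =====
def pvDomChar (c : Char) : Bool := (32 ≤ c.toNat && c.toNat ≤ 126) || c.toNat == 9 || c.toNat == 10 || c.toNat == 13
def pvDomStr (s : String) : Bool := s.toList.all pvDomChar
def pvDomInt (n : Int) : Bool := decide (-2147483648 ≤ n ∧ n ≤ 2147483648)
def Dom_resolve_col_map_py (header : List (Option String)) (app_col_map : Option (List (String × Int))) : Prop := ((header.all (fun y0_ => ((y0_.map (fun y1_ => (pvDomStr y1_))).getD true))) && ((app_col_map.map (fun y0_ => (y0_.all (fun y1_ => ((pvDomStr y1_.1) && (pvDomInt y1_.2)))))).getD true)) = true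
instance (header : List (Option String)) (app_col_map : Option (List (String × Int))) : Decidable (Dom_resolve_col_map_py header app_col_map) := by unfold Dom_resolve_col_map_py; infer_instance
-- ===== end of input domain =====

-- B replaces A's five separate header scans (and the reviewer re-scan) by one backwards pass
-- tracking all five first-match indices; objective: simpler.


-- shared normalization: `str(h).strip().lower() if h else ""` (falsy = None or "")
def pvNorm (h : Option String) : String :=
  if h.getD "" = "" then "" else PySem.Str.lower (PySem.Str.strip (h.getD ""))

-- ===== PORT A =====
-- `_find_col(headers, keywords)` with the running enumerate index carried as `i`
def findCol (i : Int) (headers : List (Option String)) (keywords : List String) : Option Int :=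
  match headers with
  | [] => none
  | h :: t =>
    if h.getD "" = "" then findCol (i + 1) t keywords
    else
      let h_str := PySem.Str.lower (PySem.Str.strip (h.getD ""))
      if keywords.all (fun k => PySem.Str.isIn k h_str) then some i
      else findCol (i + 1) t keywords

-- the re-scan loop: first i with "reviewer" in h_str and "response" not in h_str
def rescanRev (i : Int) (headers : List (Option String)) : Option Int :=
  match headers with
  | [] => none
  | h :: t =>
    let h_str := pvNorm h
    if PySem.Str.isIn "reviewer" h_str && !PySem.Str.isIn "response" h_str then some i
    else rescanRev (i + 1) t

-- the user/email loop with its two `if idx is None` accumulators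
def userEmailLoop (i : Int) (u e : Option Int) (headers : List (Option String)) :
    Option Int × Option Int :=
  match headers with
  | [] => (u, e)
  | h :: t =>
    let h_str := pvNorm h
    let u' := if u = none ∧ ((PySem.Str.isIn "name" h_str || PySem.Str.isIn "display" h_str)
                && !PySem.Str.isIn "reviewer" h_str && !PySem.Str.isIn "manager" h_str) then some i else u
    let e' := if e = none ∧ (PySem.Str.isIn "email" h_str || h_str = "mail") then some i else e
    userEmailLoop (i + 1) u' e' t

def resolve_col_map_py (header : List (Option String)) (app_col_map : Option (List (String × Int))) : (Option (List (String × Option Int))) × String :=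
  if app_col_map.getD [] ≠ [] then
    (some ((app_col_map.getD []).map (fun p => (p.1, some p.2))), "app-locked")
  else
    let idx_rev0 := findCol 0 header ["reviewer"]
    let idx_res := findCol 0 header ["response"]
    let idx_det := findCol 0 header ["details", "change"]
    let idx_rev :=
      match idx_rev0 with
      | none => none
      | some r =>
        let rev_hdr := pvNorm (PySem.List.pyGetD header r none)
        if PySem.Str.isIn "response" rev_hdr then rescanRev 0 header else some r
    let ue := userEmailLoop 0 none none header
    if idx_rev = none ∨ idx_res = none then (none, "invalid")
    else
      (some [("idx_rev", idx_rev), ("idx_res", idx_res), ("idx_det", idx_det),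
             ("idx_user", ue.1), ("idx_email", ue.2)], "detected")

-- ===== PORT B =====
-- Source B's single backwards loop, as the equivalent structural recursion:
-- process the tail (higher indices) first, then overwrite with the current index.
def altScan (i : Int) (headers : List (Option String)) :
    Option Int × Option Int × Option Int × Option Int × Option Int :=
  match headers with
  | [] => (none, none, none, none, none)
  | h :: t =>
    let st := altScan (i + 1) t
    let s := pvNorm h
    ( if PySem.Str.isIn "reviewer" s && !PySem.Str.isIn "response" s then some i else st.1,
      if PySem.Str.isIn "response" s then some i else st.2.1,
      if PySem.Str.isIn "details" s && PySem.Str.isIn "change" s then some i else st.2.2.1,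
      if (PySem.Str.isIn "name" s || PySem.Str.isIn "display" s)
          && !PySem.Str.isIn "reviewer" s && !PySem.Str.isIn "manager" s then some i else st.2.2.2.1,
      if PySem.Str.isIn "email" s || s = "mail" then some i else st.2.2.2.2 )

def resolve_col_map_py_alt (header : List (Option String)) (app_col_map : Option (List (String × Int))) : (Option (List (String × Option Int))) × String :=
  if app_col_map.getD [] ≠ [] then
    (some ((app_col_map.getD []).map (fun p => (p.1, some p.2))), "app-locked")
  else
    let st := altScan 0 header
    if st.1 = none ∨ st.2.1 = none then (none, "invalid")
    else
      (some [("idx_rev", st.1), ("idx_res", st.2.1), ("idx_det", st.2.2.1),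
             ("idx_user", st.2.2.2.1), ("idx_email", st.2.2.2.2)], "detected")

-- ===== PRECONDITION & SPEC =====
def Spec_resolve_col_map_py (header : List (Option String)) (app_col_map : Option (List (String × Int))) (out : (Option (List (String × Option Int))) × String) : Prop := out = resolve_col_map_py_alt header app_col_map
instance (header : List (Option String)) (app_col_map : Option (List (String × Int))) (out : (Option (List (String × Option Int))) × String) : Decidable (Spec_resolve_col_map_py header app_col_map out) := by unfold Spec_resolve_col_map_py; infer_instance

-- ===== CLAIM (what is proved, stated in full; the proofs are below) =====
def Claim_equal_resolve_col_map_py : Prop := ∀ (header : List (Option String)) (app_col_map : Option (List (String × Int))), Dom_resolve_col_map_py header app_col_map → Spec_resolve_col_map_py header app_col_map (resolve_col_map_py header app_col_map)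

-- ===== LEMMAS AND PROOFS =====

-- first index (from i) whose normalized header satisfies p
def ffirst (p : String → Bool) (i : Int) (headers : List (Option String)) : Option Int :=
  match headers with
  | [] => none
  | h :: t => if p (pvNorm h) then some i else ffirst p (i + 1) t

theorem ffirst_congr (p q : String → Bool) (hpq : ∀ s, p s = q s)
    (headers : List (Option String)) (i : Int) :
    ffirst p i headers = ffirst q i headers := by
  induction headers generalizing i with
  | nil => rfl
  | cons h t ih => simp only [ffirst, hpq, ih]

theorem findCol_eq_ffirst (kws : List String) (hk : kws.all (fun k => PySem.Str.isIn k "") = false)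
    (headers : List (Option String)) (i : Int) :
    findCol i headers kws = ffirst (fun s => kws.all (fun k => PySem.Str.isIn k s)) i headers := by
  induction headers generalizing i with
  | nil => rfl
  | cons h t ih =>
    simp only [findCol, ffirst]
    by_cases hb : h.getD "" = ""
    · have hn : pvNorm h = "" := by simp [pvNorm, hb]
      rw [if_pos hb, hn, if_neg (by rw [hk]; simp), ih]
    · have hn : pvNorm h = PySem.Str.lower (PySem.Str.strip (h.getD "")) := by
        simp [pvNorm, hb]
      rw [if_neg hb, hn]
      by_cases hc : (kws.all fun k =>
          PySem.Str.isIn k (PySem.Str.lower (PySem.Str.strip (h.getD "")))) = true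
      · rw [if_pos hc, if_pos hc]
      · rw [if_neg hc, if_neg hc, ih]

theorem rescanRev_eq_ffirst (headers : List (Option String)) (i : Int) :
    rescanRev i headers =
      ffirst (fun s => PySem.Str.isIn "reviewer" s && !PySem.Str.isIn "response" s) i headers := by
  induction headers generalizing i with
  | nil => rfl
  | cons h t ih => simp only [rescanRev, ffirst, ih]

theorem userEmailLoop_or (headers : List (Option String)) (i : Int) (u e : Option Int) :
    userEmailLoop i u e headers =
      (u.or (ffirst (fun s => (PySem.Str.isIn "name" s || PySem.Str.isIn "display" s)
                && !PySem.Str.isIn "reviewer" s && !PySem.Str.isIn "manager" s) i headers),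
       e.or (ffirst (fun s => PySem.Str.isIn "email" s || s = "mail") i headers)) := by
  induction headers generalizing i u e with
  | nil => simp only [userEmailLoop, ffirst, Option.or_none]
  | cons h t ih =>
    simp only [userEmailLoop, ffirst, ih]
    refine congrArg₂ Prod.mk ?_ ?_
    · cases u with
      | some x => rw [if_neg (by simp), Option.some_or, Option.some_or]
      | none =>
        by_cases h1 : ((PySem.Str.isIn "name" (pvNorm h) || PySem.Str.isIn "display" (pvNorm h))
            && !PySem.Str.isIn "reviewer" (pvNorm h) && !PySem.Str.isIn "manager" (pvNorm h)) = true
        · rw [if_pos ⟨rfl, h1⟩, if_pos h1]; exact Option.none_or.symm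
        · rw [if_neg (by intro hcon; exact h1 hcon.2), if_neg h1]
    · cases e with
      | some x => rw [if_neg (by simp), Option.some_or, Option.some_or]
      | none =>
        by_cases h2 : (PySem.Str.isIn "email" (pvNorm h) || decide (pvNorm h = "mail")) = true
        · rw [if_pos ⟨rfl, h2⟩, if_pos h2]; exact Option.none_or.symm
        · rw [if_neg (by intro hcon; exact h2 hcon.2), if_neg h2]

theorem altScan_eq (headers : List (Option String)) (i : Int) :
    altScan i headers =
      (ffirst (fun s => PySem.Str.isIn "reviewer" s && !PySem.Str.isIn "response" s) i headers,
       ffirst (fun s => PySem.Str.isIn "response" s) i headers,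
       ffirst (fun s => PySem.Str.isIn "details" s && PySem.Str.isIn "change" s) i headers,
       ffirst (fun s => (PySem.Str.isIn "name" s || PySem.Str.isIn "display" s)
                && !PySem.Str.isIn "reviewer" s && !PySem.Str.isIn "manager" s) i headers,
       ffirst (fun s => PySem.Str.isIn "email" s || s = "mail") i headers) := by
  induction headers generalizing i with
  | nil => rfl
  | cons h t ih => simp only [altScan, ffirst, ih]

theorem ffirst_none_mono (p q : String → Bool) (hpq : ∀ s, q s = true → p s = true)
    (headers : List (Option String)) (i : Int) :
    ffirst p i headers = none → ffirst q i headers = none := by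
  induction headers generalizing i with
  | nil => intro _; rfl
  | cons h t ih =>
    intro hnone
    simp only [ffirst] at hnone ⊢
    by_cases hp : p (pvNorm h) = true
    · rw [if_pos hp] at hnone; exact absurd hnone (by simp)
    · rw [if_neg hp] at hnone
      rw [if_neg (fun hq => hp (hpq _ hq))]
      exact ih (i + 1) hnone

theorem ffirst_ge (p : String → Bool) (headers : List (Option String)) (i r : Int)
    (h : ffirst p i headers = some r) : i ≤ r := by
  induction headers generalizing i with
  | nil => simp [ffirst] at h
  | cons hd t ih =>
    simp only [ffirst] at h
    by_cases hp : p (pvNorm hd) = true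
    · rw [if_pos hp] at h
      have := Option.some.inj h; omega
    · rw [if_neg hp] at h
      have := ih (i + 1) h; omega

theorem pyGetD_cons_pos {α : Type} (h : α) (t : List α) (j : Int) (d : α) (hj : 1 ≤ j) :
    PySem.List.pyGetD (h :: t) j d = PySem.List.pyGetD t (j - 1) d := by
  obtain ⟨m, rfl⟩ : ∃ m : Nat, j = (m : Int) + 1 := ⟨(j - 1).toNat, by omega⟩
  have h1 : PySem.List.pyGetD (h :: t) ((m : Int) + 1) d = (h :: t).getD (m + 1) d := by
    have := PySem.List.pyGetD_natCast (h :: t) (m + 1) d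
    simpa [Int.natCast_add] using this
  have h2 : PySem.List.pyGetD t ((m : Int) + 1 - 1) d = t.getD m d := by
    rw [show (m : Int) + 1 - 1 = (m : Int) by ring]
    exact PySem.List.pyGetD_natCast t m d
  simp [h1, List.getD]

-- if the first "reviewer" header does not contain "response", it is also the first
-- "reviewer"-without-"response" header
theorem ffirst_keep (headers : List (Option String)) (i r : Int)
    (h : ffirst (fun s => PySem.Str.isIn "reviewer" s) i headers = some r)
    (hresp : PySem.Str.isIn "response" (pvNorm (PySem.List.pyGetD headers (r - i) none)) = false) :
    ffirst (fun s => PySem.Str.isIn "reviewer" s && !PySem.Str.isIn "response" s) i headers = some r := by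
  induction headers generalizing i with
  | nil => simp [ffirst] at h
  | cons hd t ih =>
    simp only [ffirst] at h ⊢
    by_cases hp : PySem.Str.isIn "reviewer" (pvNorm hd) = true
    · rw [if_pos hp] at h
      obtain rfl : i = r := Option.some.inj h
      rw [show i - i = (0 : Int) by ring, PySem.List.pyGetD_zero_cons] at hresp
      rw [if_pos (by rw [hp, hresp]; rfl)]
    · rw [if_neg hp] at h
      have hpf : PySem.Str.isIn "reviewer" (pvNorm hd) = false := by
        cases hc : PySem.Str.isIn "reviewer" (pvNorm hd)
        · rfl
        · exact absurd hc hp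
      have hge := ffirst_ge _ t (i + 1) r h
      rw [pyGetD_cons_pos _ _ _ _ (by omega),
          show r - i - 1 = r - (i + 1) by ring] at hresp
      rw [if_neg (by rw [hpf]; simp)]
      exact ih (i + 1) h hresp

theorem rev_combine (headers : List (Option String)) :
    (match findCol 0 headers ["reviewer"] with
      | none => none
      | some r =>
        if PySem.Str.isIn "response" (pvNorm (PySem.List.pyGetD headers r none)) then
          rescanRev 0 headers
        else some r) =
    ffirst (fun s => PySem.Str.isIn "reviewer" s && !PySem.Str.isIn "response" s) 0 headers := by
  have hfc : findCol 0 headers ["reviewer"] =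
      ffirst (fun s => PySem.Str.isIn "reviewer" s) 0 headers :=
    (findCol_eq_ffirst ["reviewer"] (by decide) headers 0).trans
      (ffirst_congr _ _ (fun s => by simp) headers 0)
  rw [hfc]
  cases heq : ffirst (fun s => PySem.Str.isIn "reviewer" s) 0 headers with
  | none =>
    exact (ffirst_none_mono _ _
      (fun s hs => by
        revert hs
        cases h1 : PySem.Str.isIn "reviewer" s <;> simp) headers 0 heq).symm
  | some r =>
    simp only []
    by_cases hresp : PySem.Str.isIn "response" (pvNorm (PySem.List.pyGetD headers r none)) = true
    · rw [if_pos hresp, rescanRev_eq_ffirst]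
    · have hrespf : PySem.Str.isIn "response" (pvNorm (PySem.List.pyGetD headers r none)) = false := by
        cases hc : PySem.Str.isIn "response" (pvNorm (PySem.List.pyGetD headers r none))
        · rfl
        · exact absurd hc hresp
      rw [if_neg hresp]
      have hresp' : PySem.Str.isIn "response"
          (pvNorm (PySem.List.pyGetD headers (r - 0) none)) = false := by
        rw [show r - (0 : Int) = r by ring]; exact hrespf
      exact (ffirst_keep headers 0 r heq hresp').symm

-- ===== VERDICT (by name: the statement is the Claim_ definition above) =====
theorem resolve_col_map_py_spec : Claim_equal_resolve_col_map_py := by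
  intro header app_col_map _
  unfold Spec_resolve_col_map_py resolve_col_map_py resolve_col_map_py_alt
  by_cases happ : app_col_map.getD [] ≠ []
  · rw [if_pos happ, if_pos happ]
  · rw [if_neg happ, if_neg happ]
    have hres : findCol 0 header ["response"] =
        ffirst (fun s => PySem.Str.isIn "response" s) 0 header :=
      (findCol_eq_ffirst ["response"] (by decide) header 0).trans
        (ffirst_congr _ _ (fun s => by simp) header 0)
    have hdet : findCol 0 header ["details", "change"] =
        ffirst (fun s => PySem.Str.isIn "details" s && PySem.Str.isIn "change" s) 0 header :=
      (findCol_eq_ffirst ["details", "change"] (by decide) header 0).trans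
        (ffirst_congr _ _ (fun s => by simp) header 0)
    simp only [altScan_eq, userEmailLoop_or, Option.none_or]
    rw [rev_combine header, hres, hdet]
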